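-- pv_equiv track=rewrite | github.com/Tfloow/Connect4 | ai_student.py | fallingPlace
-- ===== SOURCE A (Python) =====
-- def fallingPlace(board):
--   """
--   :param board: plateau de puissance 4
--   :return: retourne les endroits où peut tomber notre prochaine pièce
--   """
--   fallingOne = [(i, len(board)-1) for i in range(len(board[0]))]
--
--   for i in range(len(board[0])):
--     for j in range(len(board)):
--       if board[j][i] != 0:
--         fallingOne[i] = ((i,j-1))
--         break
--
--   return fallingOne
-- ===== SOURCE B (Python) =====
-- def fallingPlace(board):
--     rows = len(board)
--     cols = len(board[0])
--     result = [(i, rows - 1) for i in range(cols)]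
--     settled = [False] * cols
--     for j in range(rows):
--         row = board[j]
--         for i in range(cols):
--             if not settled[i] and row[i] != 0:
--                 result[i] = (i, j - 1)
--                 settled[i] = True
--     return result
-- ===== Notes on version B (the rewrite author's own statement) =====
-- stated objective: alternative
-- what changed: Replaces A's column-major per-column rescans (with break) by a single row-major sweep that maintains per-column settled state and a prefilled result array.
import Mathlib
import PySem

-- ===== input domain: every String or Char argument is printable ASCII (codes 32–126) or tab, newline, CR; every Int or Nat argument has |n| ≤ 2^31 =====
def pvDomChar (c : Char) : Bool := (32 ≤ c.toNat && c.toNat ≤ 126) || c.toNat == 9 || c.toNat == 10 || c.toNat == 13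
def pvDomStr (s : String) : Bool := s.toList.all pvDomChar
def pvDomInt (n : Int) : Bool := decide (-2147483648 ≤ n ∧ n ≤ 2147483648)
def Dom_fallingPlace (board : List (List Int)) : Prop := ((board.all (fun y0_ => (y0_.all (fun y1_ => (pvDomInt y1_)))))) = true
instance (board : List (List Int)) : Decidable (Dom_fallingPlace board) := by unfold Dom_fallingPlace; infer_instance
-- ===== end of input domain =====

-- B replaces A's column-major per-column scans (with break) by one row-major sweep
-- maintaining per-column settled state; same result, alternative decomposition.

-- ===== PORT A =====
-- inner 'for j in range(len(board)): if board[j][i] != 0: fallingOne[i] = (i, j-1); break'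
-- board[j][i] is rendered with getD (default 0); exact on Pre_, where every access is in range.
def fpAinner (board : List (List Int)) (i : Nat) : List Nat → (Int × Int) → (Int × Int)
  | [], acc => acc
  | j :: js, acc =>
    if (board.getD j []).getD i 0 ≠ 0 then ((i : Int), (j : Int) - 1)
    else fpAinner board i js acc

def fallingPlace (board : List (List Int)) : List (Int × Int) :=
  let rows := board.length
  let cols := (board.headD []).length   -- len(board[0]); Python raises on [], excluded by Pre_
  (List.range cols).map (fun i => fpAinner board i (List.range rows) ((i : Int), (rows : Int) - 1))

-- ===== PORT B =====
-- one row of the sweep: for i in range(cols): if not settled[i] and row[i] != 0: ...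
-- (result, settled) kept as one list of pairs; row[i] rendered with getD, exact on Pre_.
def stepRow (row : List Int) (j : Int) (st : List ((Int × Int) × Bool)) : List ((Int × Int) × Bool) :=
  st.mapIdx (fun i p => if !p.2 && (row.getD i 0 != 0) then (((i : Int), j - 1), true) else p)

def fallingPlace_alt (board : List (List Int)) : List (Int × Int) :=
  let rows := board.length
  let cols := (board.headD []).length
  let st := (List.range rows).foldl
      (fun st j => stepRow (board.getD j []) (j : Int) st)
      ((List.range cols).map (fun i : Nat => (((i : Int), (rows : Int) - 1), false)))
  st.map Prod.fst

-- ===== PRECONDITION & SPEC =====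
-- Pre_ is exactly the inputs where Python A returns: the board is non-empty, and whenever
-- the column-i scan reaches row j (all earlier cells of the column are 0), row j is long
-- enough for index i — otherwise board[j][i] raises IndexError (B raises there too).
def Pre_fallingPlace (board : List (List Int)) : Prop :=
  board ≠ [] ∧ ∀ j < board.length, ∀ i < (board.headD []).length,
    (∀ j' < j, (board.getD j' []).getD i 0 = 0) → i < (board.getD j []).length
instance (board : List (List Int)) : Decidable (Pre_fallingPlace board) := by
  unfold Pre_fallingPlace; infer_instance

def pvWitness_fallingPlace : List (List Int) := [[0, 0], [1, 2]]

def Spec_fallingPlace (board : List (List Int)) (out : List (Int × Int)) : Prop := out = fallingPlace_alt board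
instance (board : List (List Int)) (out : List (Int × Int)) : Decidable (Spec_fallingPlace board out) := by unfold Spec_fallingPlace; infer_instance

-- ===== CLAIM (what is proved, stated in full; the proofs are below) =====
def Claim_equal_fallingPlace : Prop := ∀ (board : List (List Int)), Dom_fallingPlace board → Pre_fallingPlace board → Spec_fallingPlace board (fallingPlace board)

-- ===== LEMMAS AND PROOFS =====

-- the scalar step B performs at a fixed column i of its row-major sweep
def bstep (board : List (List Int)) (i : Nat) (p : (Int × Int) × Bool) (j : Nat) : (Int × Int) × Bool :=
  if !p.2 && ((board.getD j []).getD i 0 != 0) then (((i : Int), (j : Int) - 1), true) else p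

theorem fpAinner_eq_find (board : List (List Int)) (i : Nat) :
    ∀ (js : List Nat) (acc : Int × Int),
      fpAinner board i js acc =
        match js.find? (fun j => (board.getD j []).getD i 0 != 0) with
        | some j => ((i : Int), (j : Int) - 1)
        | none => acc := by
  intro js
  induction js with
  | nil => intro acc; rfl
  | cons j js ih =>
    intro acc
    by_cases h : ((board.getD j []).getD i 0 != 0) = true
    · rw [List.find?_cons_of_pos (p := fun j => (board.getD j []).getD i 0 != 0) (a := j) (l := js) h]
      show (if (board.getD j []).getD i 0 ≠ 0 then ((i : Int), (j : Int) - 1)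
            else fpAinner board i js acc) = _
      rw [if_pos (by simpa using h)]
    · rw [List.find?_cons_of_neg (p := fun j => (board.getD j []).getD i 0 != 0) (a := j) (l := js) h]
      show (if (board.getD j []).getD i 0 ≠ 0 then ((i : Int), (j : Int) - 1)
            else fpAinner board i js acc) = _
      rw [if_neg (by simpa using h)]
      exact ih acc

theorem bstep_settled (board : List (List Int)) (i : Nat) :
    ∀ (js : List Nat) (p : (Int × Int) × Bool), p.2 = true →
      js.foldl (bstep board i) p = p := by
  intro js
  induction js with
  | nil => intro p _; rfl
  | cons j js ih => intro p hp; rw [List.foldl_cons]; rw [show bstep board i p j = p by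
      simp [bstep, hp]]; exact ih p hp

theorem bstep_fold_fst (board : List (List Int)) (i : Nat) :
    ∀ (js : List Nat) (x : Int × Int),
      (js.foldl (bstep board i) (x, false)).1 =
        match js.find? (fun j => (board.getD j []).getD i 0 != 0) with
        | some j => ((i : Int), (j : Int) - 1)
        | none => x := by
  intro js
  induction js with
  | nil => intro x; rfl
  | cons j js ih =>
    intro x
    rw [List.foldl_cons]
    by_cases h : ((board.getD j []).getD i 0 != 0) = true
    · rw [List.find?_cons_of_pos (p := fun j => (board.getD j []).getD i 0 != 0) (a := j) (l := js) h,
        show bstep board i (x, false) j = (((i : Int), (j : Int) - 1), true) by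
          simp [bstep]; simpa using h,
        bstep_settled board i js _ rfl]
    · rw [List.find?_cons_of_neg (p := fun j => (board.getD j []).getD i 0 != 0) (a := j) (l := js) h,
        show bstep board i (x, false) j = (x, false) by simp [bstep]; simpa using h]
      exact ih x

theorem fold_stepRow_getElem (board : List (List Int)) :
    ∀ (js : List Nat) (st : List ((Int × Int) × Bool)) (k : Nat),
      (js.foldl (fun st j => stepRow (board.getD j []) (j : Int) st) st)[k]? =
        st[k]?.map (fun p => js.foldl (bstep board k) p) := by
  intro js
  induction js with
  | nil => intro st k; simp
  | cons j js ih =>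
    intro st k
    rw [List.foldl_cons, ih]
    rw [show (stepRow (board.getD j []) (j : Int) st)[k]? =
          st[k]?.map (fun p => bstep board k p j) by
        rw [stepRow, List.getElem?_mapIdx]
        cases st[k]? <;> simp [bstep]]
    rw [Option.map_map]
    rfl

theorem fallingPlace_eq_alt (board : List (List Int)) :
    fallingPlace board = fallingPlace_alt board := by
  apply List.ext_getElem?
  intro k
  show ((List.range (board.headD []).length).map
        (fun i => fpAinner board i (List.range board.length)
          ((i : Int), (board.length : Int) - 1)))[k]? =
      (((List.range board.length).foldl
          (fun st j => stepRow (board.getD j []) (j : Int) st)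
          ((List.range (board.headD []).length).map
            (fun i : Nat => (((i : Int), (board.length : Int) - 1), false)))).map Prod.fst)[k]?
  rw [List.getElem?_map, List.getElem?_map, fold_stepRow_getElem, List.getElem?_map]
  by_cases hk : k < (board.headD []).length
  · rw [List.getElem?_range hk]
    simp only [Option.map_some]
    rw [fpAinner_eq_find, bstep_fold_fst]
  · rw [List.getElem?_eq_none (by simpa using hk)]
    rfl

-- ===== VERDICT (by name: the statement is the Claim_ definition above) =====
theorem fallingPlace_spec : Claim_equal_fallingPlace := by
  intro board _ _
  exact fallingPlace_eq_alt board
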